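-- pv_equiv track=rewrite | github.com/andrey1908/kas_ros_utils | scripts/poses_handler.py | find_boundary_indexes
-- ===== SOURCE A (Python) =====
-- def find_boundary_indexes(array, value):
--     if len(array) == 0:
--         raise RuntimeError("Should not happen")
--     lower = None
--     lower_min_difference = -1
--     upper = None
--     upper_min_difference = -1
--     for i in range(len(array)):
--         if array[i] == value:
--             raise RuntimeError("Should not happen")
--         if array[i] < value:
--             if lower_min_difference > value - array[i] or lower_min_difference < 0:
--                 lower = i
--                 lower_min_difference = value - array[i]
--         if array[i] > value:
--             if upper_min_difference > array[i] - value or upper_min_difference < 0: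
--                 upper = i
--                 upper_min_difference = array[i] - value
--     return lower, upper
-- ===== SOURCE B (Python) =====
-- def find_boundary_indexes(array, value):
--     if len(array) == 0:
--         raise RuntimeError("Should not happen")
--     if value in array:
--         raise RuntimeError("Should not happen")
--     below = [(i, x) for i, x in enumerate(array) if x < value]
--     above = [(i, x) for i, x in enumerate(array) if x > value]
--     lower = max(below, key=lambda p: p[1])[0] if below else None
--     upper = min(above, key=lambda p: p[1])[0] if above else None
--     return lower, upper
-- ===== Notes on version B (the rewrite author's own statement) =====
-- stated objective: simpler
-- what changed: Replaces the hand-rolled running-minimum-difference loop with two filtered enumerations selected by max/min keyed on the element value (first index on ties), with the raise checks hoisted to the top.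
import Mathlib
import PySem

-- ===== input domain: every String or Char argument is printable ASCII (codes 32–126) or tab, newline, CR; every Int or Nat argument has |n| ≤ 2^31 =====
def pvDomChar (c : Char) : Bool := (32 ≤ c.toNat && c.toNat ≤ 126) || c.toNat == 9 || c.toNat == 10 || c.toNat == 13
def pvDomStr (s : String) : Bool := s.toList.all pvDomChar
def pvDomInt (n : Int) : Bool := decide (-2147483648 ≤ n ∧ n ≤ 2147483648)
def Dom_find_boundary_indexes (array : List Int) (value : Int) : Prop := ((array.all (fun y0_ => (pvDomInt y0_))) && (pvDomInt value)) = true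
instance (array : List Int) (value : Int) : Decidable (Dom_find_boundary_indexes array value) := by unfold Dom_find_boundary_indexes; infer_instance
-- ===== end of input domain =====

-- B replaces A's hand-rolled running-minimum-difference loop by two filtered
-- enumerations selected with max/min keyed on the element value (simpler decomposition).


-- ===== PORT A =====
-- 'raise RuntimeError' on an empty array or when value occurs in array: those
-- inputs are excluded by Pre_find_boundary_indexes, so the port carries only the loop.
def find_boundary_indexes (array : List Int) (value : Int) : Option Int × Option Int :=
  let s := (PySem.List.pyRange 0 (PySem.List.len array)).foldl
    (fun (s : (Option Int × Int) × (Option Int × Int)) i =>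
      let x := PySem.List.pyGetD array i 0
      ( (if x < value then
           (if s.1.2 > value - x ∨ s.1.2 < 0 then (some i, value - x) else s.1)
         else s.1),
        (if x > value then
           (if s.2.2 > x - value ∨ s.2.2 < 0 then (some i, x - value) else s.2)
         else s.2) ))
    ((none, -1), (none, -1))
  (s.1.1, s.2.1)

-- ===== PORT B =====
def find_boundary_indexes_alt (array : List Int) (value : Int) : Option Int × Option Int :=
  let below := (PySem.List.enumerate array).filter (fun p => decide (p.2 < value))
  let above := (PySem.List.enumerate array).filter (fun p => decide (p.2 > value))
  let lower := (PySem.List.max? below (fun p => p.2)).map (fun p => p.1)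
  let upper := (PySem.List.min? above (fun p => p.2)).map (fun p => p.1)
  (lower, upper)

-- ===== PRECONDITION & SPEC =====
-- A raises RuntimeError on an empty array and whenever value occurs in array; Pre_ excludes exactly those inputs.
def Pre_find_boundary_indexes (array : List Int) (value : Int) : Prop :=
  array ≠ [] ∧ value ∉ array
instance (array : List Int) (value : Int) : Decidable (Pre_find_boundary_indexes array value) := by unfold Pre_find_boundary_indexes; infer_instance
def pvWitness_find_boundary_indexes : List Int × Int := ([1, 5, 3], 4)

def Spec_find_boundary_indexes (array : List Int) (value : Int) (out : Option Int × Option Int) : Prop := out = find_boundary_indexes_alt array value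
instance (array : List Int) (value : Int) (out : Option Int × Option Int) : Decidable (Spec_find_boundary_indexes array value out) := by unfold Spec_find_boundary_indexes; infer_instance

-- ===== CLAIM (what is proved, stated in full; the proofs are below) =====
def Claim_equal_find_boundary_indexes : Prop := ∀ (array : List Int) (value : Int), Dom_find_boundary_indexes array value → Pre_find_boundary_indexes array value → Spec_find_boundary_indexes array value (find_boundary_indexes array value)

-- ===== LEMMAS AND PROOFS =====

-- the lower- and upper-accumulator updates of A's loop body, on an (index, element) pair
def lowStep (v : Int) (s : Option Int × Int) (p : Int × Int) : Option Int × Int :=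
  if p.2 < v then (if s.2 > v - p.2 ∨ s.2 < 0 then (some p.1, v - p.2) else s) else s
def upStep (v : Int) (s : Option Int × Int) (p : Int × Int) : Option Int × Int :=
  if p.2 > v then (if s.2 > p.2 - v ∨ s.2 < 0 then (some p.1, p.2 - v) else s) else s

-- A's index loop over range(len(array)) is the same fold over enumerate(array)
lemma foldl_pyRange_enum {β : Type} (xs : List Int) (f : β → Int × Int → β) (init : β) :
    (PySem.List.pyRange 0 (PySem.List.len xs)).foldl
      (fun s i => f s (i, PySem.List.pyGetD xs i 0)) init
    = (PySem.List.enumerate xs).foldl f init := by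
  induction xs using List.reverseRecOn with
  | nil => rfl
  | append_singleton t x ih =>
    have hlen : PySem.List.len (t ++ [x]) = (t.length : Int) + 1 := by
      simp [PySem.List.len]
    have hlent : PySem.List.len t = (t.length : Int) := by simp [PySem.List.len]
    rw [hlen, PySem.List.pyRange_one_succ_right (by positivity), List.foldl_append]
    have hcong : ∀ (acc : β), ∀ i ∈ PySem.List.pyRange 0 (t.length : Int),
        f acc (i, PySem.List.pyGetD (t ++ [x]) i 0) = f acc (i, PySem.List.pyGetD t i 0) := by
      intro acc i hi
      rw [PySem.List.mem_pyRange_one] at hi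
      rw [PySem.List.pyGetD_eq_getElem _ _ hi.1 (by simp; omega),
          PySem.List.pyGetD_eq_getElem _ _ hi.1 (by omega)]
      congr 1
      exact congrArg _ (List.getElem_append_left (by omega))
    rw [PySem.List.foldl_congr_mem _ _ _ _ hcong, ← hlent, ih]
    have hx : PySem.List.pyGetD (t ++ [x]) (t.length : Int) 0 = x := by
      rw [PySem.List.pyGetD_eq_getElem _ _ (by positivity) (by simp)]
      simp
    rw [PySem.List.enumerate_append, List.foldl_append]
    simp [PySem.List.enumerate, hx]

-- first-extremal max?/min? of l ++ [p], by one fold step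
lemma max?_append_singleton {α κ : Type} [LinearOrder κ] {l : List α} {p : α} {key : α → κ} :
    PySem.List.max? (l ++ [p]) key
    = match PySem.List.max? l key with
      | none => some p
      | some m => if key m < key p then some p else some m := by
  simp [PySem.List.max?, List.foldl_append]
  split <;> split <;> simp_all

lemma min?_append_singleton {α κ : Type} [LinearOrder κ] {l : List α} {p : α} {key : α → κ} :
    PySem.List.min? (l ++ [p]) key
    = match PySem.List.min? l key with
      | none => some p
      | some m => if key p < key m then some p else some m := by
  simp [PySem.List.min?, List.foldl_append]
  split <;> split <;> simp_all

lemma low_inv (v : Int) (l : List (Int × Int)) :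
    l.foldl (lowStep v) (none, -1)
    = match PySem.List.max? (l.filter (fun p => decide (p.2 < v))) (fun p => p.2) with
      | none => (none, -1)
      | some m => (some m.1, v - m.2) := by
  induction l using List.reverseRecOn with
  | nil => rfl
  | append_singleton l p ih =>
    rw [List.foldl_append, ih, List.filter_append]
    by_cases hp : p.2 < v
    · simp only [List.filter_cons, List.filter_nil, hp, decide_true, if_true]
      rw [max?_append_singleton]
      cases hm : PySem.List.max? (List.filter (fun p => decide (p.2 < v)) l) (fun p => p.2) with
      | none => simp [lowStep, hp]
      | some m =>
        have hmv : m.2 < v := by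
          have := PySem.List.max?_mem hm
          simp [List.mem_filter] at this
          exact this.2
        simp only [List.foldl_cons, List.foldl_nil, lowStep, hp, if_true]
        by_cases hlt : m.2 < p.2
        · have : v - m.2 > v - p.2 := by omega
          simp [hlt, this]
        · have h1 : ¬ (v - m.2 > v - p.2) := by omega
          have h2 : ¬ (v - m.2 < 0) := by omega
          simp [hlt, h1, h2]
    · have : List.filter (fun p => decide (p.2 < v)) [p] = [] := by simp [hp]
      rw [this, List.append_nil]
      simp [lowStep, hp]

lemma up_inv (v : Int) (l : List (Int × Int)) :
    l.foldl (upStep v) (none, -1)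
    = match PySem.List.min? (l.filter (fun p => decide (p.2 > v))) (fun p => p.2) with
      | none => (none, -1)
      | some m => (some m.1, m.2 - v) := by
  induction l using List.reverseRecOn with
  | nil => rfl
  | append_singleton l p ih =>
    rw [List.foldl_append, ih, List.filter_append]
    by_cases hp : p.2 > v
    · simp only [List.filter_cons, List.filter_nil, hp, decide_true, if_true]
      rw [min?_append_singleton]
      cases hm : PySem.List.min? (List.filter (fun p => decide (p.2 > v)) l) (fun p => p.2) with
      | none => simp [upStep, hp]
      | some m =>
        have hmv : m.2 > v := by
          have := PySem.List.min?_mem hm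
          simp [List.mem_filter] at this
          exact this.2
        simp only [List.foldl_cons, List.foldl_nil, upStep, hp, if_true]
        by_cases hlt : p.2 < m.2
        · have : m.2 - v > p.2 - v := by omega
          simp [hlt, this]
        · have h1 : ¬ (m.2 - v > p.2 - v) := by omega
          have h2 : ¬ (m.2 - v < 0) := by omega
          simp [hlt, h1, h2]
    · have : List.filter (fun p => decide (p.2 > v)) [p] = [] := by simp [hp]
      rw [this, List.append_nil]
      simp [upStep, hp]

-- ===== VERDICT (by name: the statement is the Claim_ definition above) =====
theorem find_boundary_indexes_spec : Claim_equal_find_boundary_indexes := by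
  intro array value _ _
  have hb : (fun (s : (Option Int × Int) × (Option Int × Int)) (i : Int) =>
      let x := PySem.List.pyGetD array i 0
      ((if x < value then (if s.1.2 > value - x ∨ s.1.2 < 0 then (some i, value - x) else s.1) else s.1),
       (if x > value then (if s.2.2 > x - value ∨ s.2.2 < 0 then (some i, x - value) else s.2) else s.2)))
    = fun s i => (lowStep value s.1 (i, PySem.List.pyGetD array i 0),
                  upStep value s.2 (i, PySem.List.pyGetD array i 0)) := by
    funext s i
    simp [lowStep, upStep]
  unfold Spec_find_boundary_indexes find_boundary_indexes find_boundary_indexes_alt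
  simp only [hb]
  rw [foldl_pyRange_enum array
        (fun (s : (Option Int × Int) × (Option Int × Int)) p =>
          (lowStep value s.1 p, upStep value s.2 p))]
  rw [PySem.List.foldl_prod_mk (f := lowStep value) (g := upStep value)]
  simp only [low_inv, up_inv]
  cases h1 : PySem.List.max? ((PySem.List.enumerate array).filter (fun p => decide (p.2 < value))) (fun p => p.2) <;>
  cases h2 : PySem.List.min? ((PySem.List.enumerate array).filter (fun p => decide (p.2 > value))) (fun p => p.2) <;>
  simp
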